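-- pv_equiv track=rewrite | github.com/PalinV/tests | main.py | sorted_course
-- ===== SOURCE A (Python) =====
-- def sorted_course(courses, mentors, durations):
--     courses_list = []
--     for course, mentor, duration in zip(courses, mentors, durations):
--         course_dict = {"title":course, "mentors":mentor, "duration":duration}
--         courses_list.append(course_dict)
--     durations_dict = {}
--     pair = {}
--     for id, course in enumerate(courses_list):
--         key = course["duration"]
--         if key not in durations_dict:
--             pair[key] = [id]
--             durations_dict = pair
--         else:
--             durations_dict[key].append(id)
--     durations_dict = sorted(durations_dict.items())
--     dict_course_duraction = {}
--     for duration, id in durations_dict: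
--         for x in range(len(id)):
--             dict_course_duraction[courses[id[x]]] = duration
--     return dict_course_duraction
-- ===== SOURCE B (Python) =====
-- def sorted_course(courses, mentors, durations):
--     result = {}
--     for course, _mentor, duration in sorted(zip(courses, mentors, durations), key=lambda t: t[2]):
--         result[course] = duration
--     return result
-- ===== Notes on version B (the rewrite author's own statement) =====
-- stated objective: simpler
-- what changed: B drops A's duration->indices grouping dict, the sort of its items and the index-based re-emission, and instead makes one stable sort of the zipped (course, mentor, duration) triples by duration followed by a single dict-building pass; stability of Python's sort reproduces A's group-then-emit order exactly.
import Mathlib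
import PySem

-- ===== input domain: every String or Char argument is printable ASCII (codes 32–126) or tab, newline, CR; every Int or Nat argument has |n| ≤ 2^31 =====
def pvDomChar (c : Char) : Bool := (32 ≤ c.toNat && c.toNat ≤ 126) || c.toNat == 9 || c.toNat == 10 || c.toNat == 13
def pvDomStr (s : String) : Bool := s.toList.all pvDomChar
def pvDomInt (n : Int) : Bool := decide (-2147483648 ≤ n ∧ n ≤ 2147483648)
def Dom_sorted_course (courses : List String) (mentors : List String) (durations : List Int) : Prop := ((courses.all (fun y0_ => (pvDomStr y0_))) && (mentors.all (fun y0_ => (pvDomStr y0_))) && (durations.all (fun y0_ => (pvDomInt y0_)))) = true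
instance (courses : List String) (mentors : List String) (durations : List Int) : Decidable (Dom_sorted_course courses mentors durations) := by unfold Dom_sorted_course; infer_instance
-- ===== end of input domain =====

-- B replaces A's duration→ids grouping dict + key sort + re-indexing emission by ONE stable
-- sort of the zipped triples followed by a single dict-building pass (objective: simpler).

-- ===== PORT A =====
-- Python dicts {"title":…, "mentors":…, "duration":…} carry fixed keys: ported as triples (title, mentor, duration).
-- 'pair' and 'durations_dict' alias the SAME dict object after the first insertion, so the loop is one dict update.
def sorted_course (courses : List String) (mentors : List String) (durations : List Int) : List (String × Int) :=
  -- courses_list = []; for course, mentor, duration in zip(...): courses_list.append({...})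
  let courses_list : List (String × String × Int) :=
    (courses.zip (mentors.zip durations)).foldl (fun acc t => acc ++ [t]) []
  -- for id, course in enumerate(courses_list): if key not in durations_dict: pair[key]=[id]; durations_dict=pair
  --                                            else: durations_dict[key].append(id)
  let durations_dict : PySem.Dict Int (List Int) :=
    (PySem.List.enumerate courses_list).foldl
      (fun d p =>
        if d.contains p.2.2.2 = false then d.insert p.2.2.2 [p.1]
        else d.modify p.2.2.2 [] (fun l => l ++ [p.1]))
      PySem.Dict.empty
  -- sorted(durations_dict.items()): dict keys are distinct, so Python's tuple comparison never
  -- reaches the second component — sorting the items by their key is exact here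
  let sortedItems := PySem.List.sorted durations_dict.items (fun p => p.1)
  -- for duration, id in ...: for x in range(len(id)): dict_course_duraction[courses[id[x]]] = duration
  let final : PySem.Dict String Int :=
    sortedItems.foldl
      (fun dd p =>
        (PySem.List.pyRange 0 (PySem.List.len p.2)).foldl
          (fun dd x => dd.insert (PySem.List.pyGetD courses (PySem.List.pyGetD p.2 x 0) "") p.1) dd)
      PySem.Dict.empty
  final.items

-- ===== PORT B =====
-- result = {}; for course, _mentor, duration in sorted(zip(courses, mentors, durations), key=lambda t: t[2]):
--     result[course] = duration
-- return result
def sorted_course_alt (courses : List String) (mentors : List String) (durations : List Int) : List (String × Int) :=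
  let pairs := courses.zip (mentors.zip durations)
  ((PySem.List.sorted pairs (fun t => t.2.2)).foldl
      (fun r t => r.insert t.1 t.2.2) PySem.Dict.empty).items

-- ===== PRECONDITION & SPEC =====
def Spec_sorted_course (courses : List String) (mentors : List String) (durations : List Int) (out : List (String × Int)) : Prop := out = sorted_course_alt courses mentors durations
instance (courses : List String) (mentors : List String) (durations : List Int) (out : List (String × Int)) : Decidable (Spec_sorted_course courses mentors durations out) := by unfold Spec_sorted_course; infer_instance

-- ===== CLAIM (what is proved, stated in full; the proofs are below) =====
def Claim_equal_sorted_course : Prop := ∀ (courses : List String) (mentors : List String) (durations : List Int), Dom_sorted_course courses mentors durations → Spec_sorted_course courses mentors durations (sorted_course courses mentors durations)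

-- ===== LEMMAS AND PROOFS =====

-- insertBy puts x right after the elements it does not go before
lemma insertBy_split {α : Type} (blt : α → α → Bool) (x : α) :
    ∀ (A B : List α), (∀ a ∈ A, blt x a = false) → (∀ b ∈ B, blt x b = true) →
      PySem.List.insertBy blt x (A ++ B) = A ++ x :: B := by
  intro A
  induction A with
  | nil =>
      intro B _ hB
      cases B with
      | nil => rfl
      | cons b bs => simp [PySem.List.insertBy, hB b (by simp)]
  | cons a A' ih =>
      intro B hA hB
      have ha : blt x a = false := hA a (by simp)
      simp only [List.cons_append, PySem.List.insertBy, ha]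
      simp [ih B (fun a ha' => hA a (by simp [ha'])) hB]

-- in a strictly increasing list, a member that bounds all elements is the last element
lemma strict_max_last {L : List Int} {kx : Int} (hp : L.Pairwise (· < ·)) (hm : kx ∈ L)
    (hb : ∀ b ∈ L, b ≤ kx) : ∃ L', L = L' ++ [kx] := by
  obtain ⟨s, t, rfl⟩ := List.append_of_mem hm
  have ht : t = [] := by
    cases t with
    | nil => rfl
    | cons c cs =>
        exfalso
        have h1 : kx < c := by
          have := (List.pairwise_append.mp hp).2.1
          exact (List.pairwise_cons.mp this).1 c (by simp)
        have h2 : c ≤ kx := hb c (by simp)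
        omega
  exact ⟨s, by simp [ht]⟩

-- a strictly increasing list splits at any pivot into its ≤-part followed by its >-part
lemma strict_split (kx : Int) : ∀ {L : List Int}, L.Pairwise (· < ·) →
    L = L.filter (fun k => decide (k ≤ kx)) ++ L.filter (fun k => decide (kx < k)) := by
  intro L
  induction L with
  | nil => intro _; rfl
  | cons a L' ih =>
      intro hp
      have hp' : L'.Pairwise (· < ·) := (List.pairwise_cons.mp hp).2
      by_cases h : a ≤ kx
      · simp only [List.filter_cons, decide_eq_true h, if_pos, show decide (kx < a) = false by simp; omega]
        simpa using congrArg (a :: ·) (ih hp')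
      · have hlt : kx < a := by omega
        have hall : ∀ b ∈ L', kx < b := fun b hb => lt_trans hlt ((List.pairwise_cons.mp hp).1 b hb)
        have h1 : (a :: L').filter (fun k => decide (k ≤ kx)) = [] := by
          rw [List.filter_eq_nil_iff]
          intro b hb
          rcases List.mem_cons.mp hb with rfl | hb'
          · simpa using h
          · have := hall b hb'; simp; omega
        have h2 : (a :: L').filter (fun k => decide (kx < k)) = a :: L' := by
          rw [List.filter_eq_self]
          intro b hb
          rcases List.mem_cons.mp hb with rfl | hb'
          · simpa using hlt
          · simpa using hall b hb'
        rw [h1, h2]; rfl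

-- flatMap respects pointwise-equal group functions
lemma flatMap_congr_mem {α β : Type} {L : List α} {f g : α → List β}
    (h : ∀ a ∈ L, f a = g a) : L.flatMap f = L.flatMap g := by
  simp only [List.flatMap_eq_foldl]
  exact PySem.List.foldl_congr_mem L _ _ [] (fun acc x hx => by rw [h x hx])

-- STABILITY of Python's sort: sorted(ts, key) lists, for each distinct key value in increasing
-- order, the elements of ts with that key in their original order.
lemma sorted_stable_group {α : Type} (key : α → Int) : ∀ (ts : List α),
    PySem.List.sorted ts key =
      (PySem.List.sorted (PySem.Set.ofList (ts.map key)) (fun k => k)).flatMap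
        (fun k => ts.filter (fun t => key t == k)) := by
  intro ts
  induction ts using List.reverseRecOn with
  | nil => rfl
  | append_singleton ts x ih =>
      set kx := key x with hkx
      set K := PySem.Set.ofList (ts.map key) with hK
      set S := PySem.List.sorted K (fun k => k) with hS
      set F : Int → List α := fun k => ts.filter (fun t => key t == k) with hF
      set F' : Int → List α := fun k => (ts ++ [x]).filter (fun t => key t == k) with hF'
      have hSp : S.Pairwise (· < ·) := by rw [hS, hK]; exact PySem.List.sorted_ofList_pairwise_lt _
      set lo := S.filter (fun k => decide (k ≤ kx)) with hlo
      set hi := S.filter (fun k => decide (kx < k)) with hhi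
      have hsplit : S = lo ++ hi := strict_split kx hSp
      have hlop : lo.Pairwise (· < ·) := List.Pairwise.sublist (List.filter_sublist ..) hSp
      have hhip : hi.Pairwise (· < ·) := List.Pairwise.sublist (List.filter_sublist ..) hSp
      have hloK : ∀ k ∈ lo, k ∈ K ∧ k ≤ kx := by
        intro k hk
        have := List.mem_filter.mp hk
        exact ⟨(PySem.List.mem_sorted _ _ _ _).mp this.1, by simpa using this.2⟩
      have hhiK : ∀ k ∈ hi, k ∈ K ∧ kx < k := by
        intro k hk
        have := List.mem_filter.mp hk
        exact ⟨(PySem.List.mem_sorted _ _ _ _).mp this.1, by simpa using this.2⟩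
      -- the left side: insert x into sorted ts
      have hLHS : PySem.List.sorted (ts ++ [x]) key =
          PySem.List.insertBy (fun a b => decide (key a < key b)) x (PySem.List.sorted ts key) := by
        rw [PySem.List.sorted_eq_foldl_insertBy, PySem.List.sorted_eq_foldl_insertBy, List.foldl_append]
        rfl
      -- key of every element of a group F k is k
      have hFkey : ∀ k, ∀ a ∈ F k, key a = k := by
        intro k a ha
        have := (List.mem_filter.mp ha).2
        exact by simpa using this
      have hins : PySem.List.insertBy (fun a b => decide (key a < key b)) x
          (lo.flatMap F ++ hi.flatMap F) = lo.flatMap F ++ x :: hi.flatMap F := by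
        apply insertBy_split
        · intro a ha
          obtain ⟨k, hk, hak⟩ := List.mem_flatMap.mp ha
          have := (hloK k hk).2
          have := hFkey k a hak
          simp; omega
        · intro b hb
          obtain ⟨k, hk, hbk⟩ := List.mem_flatMap.mp hb
          have := (hhiK k hk).2
          have := hFkey k b hbk
          simp; omega
      have hF'eq : ∀ k, F' k = F k ++ (if kx = k then [x] else []) := by
        intro k
        show (ts ++ [x]).filter (fun t => key t == k) = _
        rw [List.filter_append]
        simp only [List.filter_cons, List.filter_nil]
        by_cases h : kx = k
        · simp [hF, ← hkx, h]
        · simp [hF, ← hkx, h]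
      have hF'ne : ∀ k, kx ≠ k → F' k = F k := by
        intro k h; rw [hF'eq k, if_neg h, List.append_nil]
      -- the new key set
      have hK' : PySem.Set.ofList ((ts ++ [x]).map key) = PySem.Set.add K kx := by
        rw [List.map_append, PySem.Set.ofList_append]
        rfl
      by_cases hmem : kx ∈ K
      · -- kx already a key of ts: key set unchanged, x joins the end of its group
        have hadd : PySem.Set.add K kx = K := by
          simp [PySem.Set.add, PySem.Set.contains, hmem]
        rw [hLHS, ih, hK', hadd, ← hS, hsplit, List.flatMap_append, hins, List.flatMap_append]
        have hkxlo : kx ∈ lo := by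
          rw [hlo]
          exact List.mem_filter.mpr ⟨(PySem.List.mem_sorted _ _ _ _).mpr hmem, by simp⟩
        obtain ⟨lo', hlo'⟩ := strict_max_last hlop hkxlo (fun b hb => (hloK b hb).2)
        have hlo'lt : ∀ a ∈ lo', a < kx := by
          intro a ha
          have := hlop
          rw [hlo'] at this
          exact (List.pairwise_append.mp this).2.2 a ha kx (by simp)
        have e1 : lo.flatMap F' = lo'.flatMap F ++ (F kx ++ [x]) := by
          rw [hlo', List.flatMap_append]
          congr 1
          · exact flatMap_congr_mem (fun a ha => hF'ne a (by have := hlo'lt a ha; omega))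
          · simp [hF'eq kx]
        have e2 : hi.flatMap F' = hi.flatMap F := by
          exact flatMap_congr_mem (fun a ha => hF'ne a (by have := (hhiK a ha).2; omega))
        have e3 : lo.flatMap F = lo'.flatMap F ++ F kx := by
          rw [hlo', List.flatMap_append]; simp
        rw [e1, e2, e3]
        simp
      · -- kx is a fresh key: it is inserted between the ≤-part and the >-part
        have hadd : PySem.Set.add K kx = K ++ [kx] := by
          simp only [PySem.Set.add, PySem.Set.contains]
          rw [if_neg]
          simp [hmem]
        have hSne : ∀ k ∈ S, k ≠ kx := by
          intro k hk
          have := (PySem.List.mem_sorted _ _ _ _).mp hk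
          intro h; exact hmem (h ▸ this)
        have hS' : PySem.List.sorted (K ++ [kx]) (fun k => k) = lo ++ kx :: hi := by
          apply PySem.List.sorted_eq_of_perm_of_pairwise_lt
          · refine List.perm_middle.trans ?_
            rw [← hsplit]
            exact ((PySem.List.sorted_perm K _ false).cons kx).trans
              (List.perm_append_singleton kx K).symm
          · rw [List.pairwise_append]
            refine ⟨hlop, ?_, ?_⟩
            · rw [List.pairwise_cons]
              exact ⟨fun b hb => (hhiK b hb).2, hhip⟩
            · intro a ha b hb
              have h1 := (hloK a ha).2
              have h2 : a ≠ kx := hSne a (hsplit ▸ List.mem_append_left _ ha)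
              rcases List.mem_cons.mp hb with rfl | hb'
              · omega
              · have := (hhiK b hb').2; omega
        have hFkx : F kx = [] := by
          rw [hF, List.filter_eq_nil_iff]
          intro t ht
          have : key t ∈ ts.map key := List.mem_map_of_mem ht
          have hne : key t ≠ kx := by
            intro h
            exact hmem ((PySem.Set.mem_ofList _ _).mpr (h ▸ this))
          simpa using hne
        rw [hLHS, ih, hK', hadd, hS', hsplit, List.flatMap_append, hins]
        rw [List.flatMap_append, List.flatMap_cons]
        have e1 : lo.flatMap F' = lo.flatMap F :=
          flatMap_congr_mem (fun a ha => hF'ne a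
            (fun h => (hSne a (hsplit ▸ List.mem_append_left _ ha)) h.symm))
        have e2 : hi.flatMap F' = hi.flatMap F :=
          flatMap_congr_mem (fun a ha => hF'ne a (by have := (hhiK a ha).2; omega))
        have e3 : F' kx = [x] := by rw [hF'eq kx, hFkx, if_pos rfl]; rfl
        rw [e1, e2, e3]
        simp

-- membership in enumerate
lemma mem_enumerate {α : Type} : ∀ (xs : List α) (s : Int) (p : Int × α),
    p ∈ PySem.List.enumerate xs s → ∃ i : Nat, ∃ h : i < xs.length, p = (s + i, xs[i]) := by
  intro xs
  induction xs with
  | nil => intro s p hp; simp [PySem.List.enumerate_nil] at hp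
  | cons x xs ih =>
      intro s p hp
      rw [PySem.List.enumerate_cons] at hp
      rcases List.mem_cons.mp hp with rfl | hp'
      · exact ⟨0, by simp, by simp⟩
      · obtain ⟨i, hi, rfl⟩ := ih (s + 1) p hp'
        refine ⟨i + 1, by simpa using hi, ?_⟩
        simp only [List.getElem_cons_succ, Prod.mk.injEq]
        refine ⟨by push_cast; ring, trivial⟩

-- enumerate's second components are the original list
lemma map_snd_enumerate {α : Type} : ∀ (xs : List α) (s : Int),
    (PySem.List.enumerate xs s).map (fun p => p.2) = xs := by
  intro xs
  induction xs with
  | nil => intro s; rfl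
  | cons x xs ih => intro s; rw [PySem.List.enumerate_cons]; simp [ih]


-- the common normal form both ports reduce to: fold over the sorted distinct durations,
-- inserting (title, duration) for the enumerated triples of each duration group in order
def pvTs (courses mentors : List String) (durations : List Int) : List (String × String × Int) :=
  courses.zip (mentors.zip durations)

def pvCommon (courses mentors : List String) (durations : List Int) : List (String × Int) :=
  ((PySem.List.sorted (PySem.Set.ofList ((pvTs courses mentors durations).map (fun t => t.2.2))) (fun k => k)).foldl
      (fun dd k =>
        (((PySem.List.enumerate (pvTs courses mentors durations)).filter (fun p => p.2.2.2 == k)).foldl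
            (fun acc p => acc.insert p.2.1 k) dd))
      PySem.Dict.empty).items

lemma alt_eq_common (courses mentors : List String) (durations : List Int) :
    sorted_course_alt courses mentors durations = pvCommon courses mentors durations := by
  unfold sorted_course_alt pvCommon
  show ((PySem.List.sorted (courses.zip (mentors.zip durations)) (fun t => t.2.2)).foldl
      (fun r t => r.insert t.1 t.2.2) PySem.Dict.empty).items = _
  rw [sorted_stable_group (fun t => t.2.2) (courses.zip (mentors.zip durations)),
      List.foldl_flatMap]
  congr 1
  apply PySem.List.foldl_congr_mem
  intro acc k _
  have hts : (courses.zip (mentors.zip durations)).filter (fun t => t.2.2 == k)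
      = ((PySem.List.enumerate (courses.zip (mentors.zip durations))).filter
          (fun p => p.2.2.2 == k)).map (fun p => p.2) := by
    conv_lhs => rw [← map_snd_enumerate (courses.zip (mentors.zip durations)) 0]
    rw [List.filter_map]
    rfl
  have step1 : List.foldl (fun r t => r.insert t.1 t.2.2) acc
        ((courses.zip (mentors.zip durations)).filter (fun t => t.2.2 == k))
      = List.foldl (fun r t => r.insert t.1 k) acc
        ((courses.zip (mentors.zip durations)).filter (fun t => t.2.2 == k)) :=
    PySem.List.foldl_congr_mem _ _ _ _ (fun r t ht => by
      have hk : t.2.2 = k := by simpa using (List.mem_filter.mp ht).2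
      rw [hk])
  rw [step1, hts, List.foldl_map]
  rfl

lemma a_eq_common (courses mentors : List String) (durations : List Int) :
    sorted_course courses mentors durations = pvCommon courses mentors durations := by
  unfold sorted_course pvCommon pvTs
  set ts := courses.zip (mentors.zip durations) with hts
  show ((PySem.List.sorted
      ((PySem.List.enumerate ((ts.foldl (fun acc t => acc ++ [t]) []))).foldl
        (fun d p => if d.contains p.2.2.2 = false then d.insert p.2.2.2 [p.1]
          else d.modify p.2.2.2 [] (fun l => l ++ [p.1]))
        PySem.Dict.empty).items (fun p => p.1)).foldl
      (fun dd p => (PySem.List.pyRange 0 (PySem.List.len p.2)).foldl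
        (fun dd x => dd.insert (PySem.List.pyGetD courses (PySem.List.pyGetD p.2 x 0) "") p.1) dd)
      PySem.Dict.empty).items = _
  have hcl : ts.foldl (fun acc t => acc ++ [t]) [] = ts := by
    simpa using PySem.List.foldl_append_singleton_eq_self ts []
  rw [hcl]
  set l := PySem.List.enumerate ts with hl
  have hstep : ∀ (d : PySem.Dict Int (List Int)), ∀ p ∈ l,
      (if d.contains p.2.2.2 = false then d.insert p.2.2.2 [p.1]
        else d.modify p.2.2.2 [] (fun l => l ++ [p.1]))
      = d.modify p.2.2.2 [] (fun l => l ++ [p.1]) := by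
    intro d p _
    by_cases h : d.contains p.2.2.2 = false
    · rw [if_pos h]
      simp [PySem.Dict.modify, PySem.Dict.getD_of_not_contains d _ h]
    · rw [if_neg h]
  rw [PySem.List.foldl_congr_mem l _ _ PySem.Dict.empty hstep]
  have hmapfold : List.foldl (fun d p => d.modify p.2.2.2 [] (fun l => l ++ [p.1])) PySem.Dict.empty l
      = List.foldl (fun d q => d.modify q.1 [] (fun l => l ++ [q.2])) PySem.Dict.empty
          (l.map (fun p => (p.2.2.2, p.1))) := by
    rw [List.foldl_map]
  rw [hmapfold]
  set l' := l.map (fun p => (p.2.2.2, p.1)) with hl'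
  set D := List.foldl (fun d q => d.modify q.1 [] (fun l => l ++ [q.2])) PySem.Dict.empty l' with hD
  have hkeys : D.keys = PySem.Set.ofList (l'.map (fun q => q.1)) := by
    have h := PySem.Dict.keys_foldl_modify_key l' (fun q => q.1) ([] : List Int)
      (fun _ q => fun ll => ll ++ [q.2]) PySem.Dict.empty
    rw [hD]
    simpa [PySem.Set.ofList_eq_foldl, PySem.Set.update, PySem.Dict.keys_empty] using h
  have hnodup : D.keys.Nodup := by
    rw [hD]
    exact PySem.Dict.nodup_keys_foldl_modify_key l' (fun q => q.1) ([] : List Int)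
      (fun _ q => fun ll => ll ++ [q.2]) PySem.Dict.empty (by simp [PySem.Dict.keys_empty])
  have hgetD : ∀ k, D.getD k [] = (l'.filter (fun q => q.1 == k)).map (fun q => q.2) := by
    intro k
    rw [hD]
    simpa using PySem.Dict.getD_foldl_modify_append l' PySem.Dict.empty k
  have hitems : D.items = (PySem.Set.ofList (l'.map (fun q => q.1))).map
      (fun k => (k, (l'.filter (fun q => q.1 == k)).map (fun q => q.2))) := by
    rw [PySem.Dict.items_eq_map_keys D hnodup ([] : List Int), hkeys]
    apply List.map_congr_left
    intro k _
    rw [hgetD k]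
  rw [hitems]
  have hkl : l'.map (fun q => q.1) = ts.map (fun t => t.2.2) := by
    rw [hl', List.map_map]
    conv_rhs => rw [← map_snd_enumerate ts 0, List.map_map]
    rfl
  rw [hkl]
  set K := PySem.Set.ofList (ts.map (fun t => t.2.2)) with hK
  set S := PySem.List.sorted K (fun k => k) with hS
  set I : Int → List Int := fun k => (l'.filter (fun q => q.1 == k)).map (fun q => q.2) with hI
  have hsortitems : PySem.List.sorted (K.map (fun k => (k, I k))) (fun p => p.1)
      = S.map (fun k => (k, I k)) := by
    apply PySem.List.sorted_eq_of_perm_of_pairwise_lt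
    · exact (PySem.List.sorted_perm K _ false).map _
    · have hp : S.Pairwise (· < ·) := by rw [hS, hK]; exact PySem.List.sorted_ofList_pairwise_lt _
      exact hp.map _ (fun a b h => h)
  rw [hsortitems, List.foldl_map]
  apply congrArg PySem.Dict.items
  apply PySem.List.foldl_congr_mem
  intro dd k _
  have hrange : List.foldl
      (fun acc x => acc.insert (PySem.List.pyGetD courses (PySem.List.pyGetD (I k) x 0) "") k) dd
      (PySem.List.pyRange 0 (PySem.List.len (I k)))
      = List.foldl (fun acc idv => acc.insert (PySem.List.pyGetD courses idv "") k) dd (I k) := by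
    simpa using PySem.List.foldl_pyRange_pyGetD (I k) (0 : Int)
      (fun acc idv => acc.insert (PySem.List.pyGetD courses idv "") k) dd (le_refl 0)
  rw [hrange]
  have hfilt : l'.filter (fun q => q.1 == k) = (l.filter (fun p => p.2.2.2 == k)).map (fun p => (p.2.2.2, p.1)) := by
    rw [hl', List.filter_map]
    rfl
  have hIk : I k = (l.filter (fun p => p.2.2.2 == k)).map (fun p => p.1) := by
    rw [hI]
    show (l'.filter (fun q => q.1 == k)).map (fun q => q.2) = _
    rw [hfilt, List.map_map]
    rfl
  rw [hIk, List.foldl_map]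
  apply PySem.List.foldl_congr_mem
  intro acc p hp
  have hpl : p ∈ l := (List.mem_filter.mp hp).1
  obtain ⟨i, hi, rfl⟩ := mem_enumerate ts 0 p hpl
  have hts_len : ts.length ≤ courses.length := by
    rw [hts, List.length_zip]
    omega
  have hget : PySem.List.pyGetD courses ((0 : Int) + (i : Int)) "" = courses[i]'(by omega) := by
    rw [PySem.List.pyGetD_eq_getElem courses "" (by omega) (by omega)]
    congr 1
    omega
  have htsi : (ts[i]'hi).1 = courses[i]'(by omega) := by
    show ((courses.zip (mentors.zip durations))[i]'hi).1 = _
    rw [List.getElem_zip]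
  rw [hget, htsi]

-- ===== VERDICT (by name: the statement is the Claim_ definition above) =====
theorem sorted_course_spec : Claim_equal_sorted_course := by
  intro courses mentors durations _
  unfold Spec_sorted_course
  rw [a_eq_common, alt_eq_common]
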